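-- pv_equiv track=rewrite | github.com/DaminK/GlobalGround-MetricLearning | code/ggml/data/util.py | create_triplets
-- ===== SOURCE A (Python) =====
-- def create_triplets(distributions,labels):
--     triplets = []
--     for i,_ in enumerate(distributions):
--         for j,_ in enumerate(distributions):
--             for k,_ in enumerate(distributions):
--                 if labels[i]==labels[j] and labels[j] != labels[k] and i != j:
--                     triplets.append((i,j,k))
--     return triplets
-- ===== SOURCE B (Python) =====
-- def create_triplets(distributions, labels):
--     n = len(distributions)
--     groups = {}
--     for idx in range(n):
--         groups.setdefault(labels[idx], []).append(idx)
--     diff = {lab: [k for k in range(n) if labels[k] != lab] for lab in groups}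
--     out = []
--     for i in range(n):
--         lab = labels[i]
--         for j in groups[lab]:
--             if j != i:
--                 for k in diff[lab]:
--                     out.append((i, j, k))
--     return out
-- ===== Notes on version B (the rewrite author's own statement) =====
-- stated objective: faster
-- what changed: Builds a label->indices dict in one pass and a per-distinct-label different-label index list once, so the main loop only does dict lookups and emits qualifying triplets, instead of A's triple nested scan over all n^3 index triples.
import Mathlib
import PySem

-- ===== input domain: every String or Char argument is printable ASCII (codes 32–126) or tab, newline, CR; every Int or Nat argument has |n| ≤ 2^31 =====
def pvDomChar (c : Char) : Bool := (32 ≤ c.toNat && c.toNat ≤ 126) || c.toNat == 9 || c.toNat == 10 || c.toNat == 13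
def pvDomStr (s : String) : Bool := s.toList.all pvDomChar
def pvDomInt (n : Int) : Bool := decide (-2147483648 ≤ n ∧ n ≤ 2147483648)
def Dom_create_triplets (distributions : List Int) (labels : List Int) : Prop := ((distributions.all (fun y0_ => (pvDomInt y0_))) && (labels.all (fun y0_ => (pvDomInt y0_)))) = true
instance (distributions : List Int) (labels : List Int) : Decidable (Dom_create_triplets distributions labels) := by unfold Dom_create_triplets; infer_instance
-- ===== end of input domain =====

-- B groups the indices by label in one dict pass and precomputes, once per distinct label, the
-- list of different-label indices, so its main loop only does dict lookups (faster); return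
-- values agree on all inputs where A returns.

-- ===== PORT A =====
def create_triplets (distributions : List Int) (labels : List Int) : List (Int × Int × Int) :=
  (PySem.List.enumerate distributions 0).foldl (fun triplets p =>
    (PySem.List.enumerate distributions 0).foldl (fun triplets q =>
      (PySem.List.enumerate distributions 0).foldl (fun triplets r =>
        if (PySem.List.pyGetD labels p.1 0 == PySem.List.pyGetD labels q.1 0)
            && (PySem.List.pyGetD labels q.1 0 != PySem.List.pyGetD labels r.1 0)
            && (p.1 != q.1)
        then triplets ++ [(p.1, q.1, r.1)] else triplets) triplets) triplets) []

-- ===== PORT B =====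
-- groups.setdefault(lab, []).append(idx) == groups[lab] = groups.get(lab, []) + [idx] == Dict.modify lab [] (· ++ [idx]).
-- groups[lab] / diff[lab] in the main loop never raise KeyError (lab = labels[i] was inserted while
-- building groups), so getD with default [] is an exact port there.
def create_triplets_alt (distributions : List Int) (labels : List Int) : List (Int × Int × Int) :=
  let n : Int := distributions.length
  let groups : PySem.Dict Int (List Int) :=
    (PySem.List.pyRange 0 n 1).foldl
      (fun d idx => d.modify (PySem.List.pyGetD labels idx 0) [] (· ++ [idx])) PySem.Dict.empty
  let diff : PySem.Dict Int (List Int) :=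
    groups.keys.foldl
      (fun d lab => d.insert lab ((PySem.List.pyRange 0 n 1).filter
        (fun k => PySem.List.pyGetD labels k 0 != lab))) PySem.Dict.empty
  (PySem.List.pyRange 0 n 1).foldl (fun out i =>
    let lab := PySem.List.pyGetD labels i 0
    (groups.getD lab []).foldl (fun out j =>
      if j != i then
        (diff.getD lab []).foldl (fun out k => out ++ [(i, j, k)]) out
      else out) out) []

-- ===== PRECONDITION & SPEC =====
-- Python A raises IndexError (labels[i]) exactly when labels is shorter than distributions.
def Pre_create_triplets (distributions : List Int) (labels : List Int) : Prop :=
  distributions.length ≤ labels.length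
instance (distributions : List Int) (labels : List Int) : Decidable (Pre_create_triplets distributions labels) := by unfold Pre_create_triplets; infer_instance
def pvWitness_create_triplets : List Int × List Int := ([10, 20, 30], [1, 1, 2])

def Spec_create_triplets (distributions : List Int) (labels : List Int) (out : List (Int × Int × Int)) : Prop := out = create_triplets_alt distributions labels
instance (distributions : List Int) (labels : List Int) (out : List (Int × Int × Int)) : Decidable (Spec_create_triplets distributions labels out) := by unfold Spec_create_triplets; infer_instance

-- ===== CLAIM (what is proved, stated in full; the proofs are below) =====
def Claim_equal_create_triplets : Prop := ∀ (distributions : List Int) (labels : List Int), Dom_create_triplets distributions labels → Pre_create_triplets distributions labels → Spec_create_triplets distributions labels (create_triplets distributions labels)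

-- ===== LEMMAS AND PROOFS =====

-- the j-loop of B: a fold that conditionally appends a block is a flatMap over the filtered list
lemma foldl_append_block_if {α β : Type} (p : α → Bool) (M : α → List β)
    (l : List α) (acc : List β) :
    l.foldl (fun out j => if p j then out ++ M j else out) acc
      = acc ++ (l.filter p).flatMap M := by
  induction l generalizing acc with
  | nil => simp
  | cons a l ih =>
    cases hp : p a with
    | true => simp [hp, ih]
    | false => simp [hp, ih]

-- after building, groups.getD lab [] is the ascending list of indices carrying label lab
lemma groups_getD (labels : List Int) (n : Int) (lab : Int) :
    ((PySem.List.pyRange 0 n 1).foldl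
        (fun d idx => d.modify (PySem.List.pyGetD labels idx 0) [] (· ++ [idx]))
        PySem.Dict.empty).getD lab []
      = (PySem.List.pyRange 0 n 1).filter (fun j => PySem.List.pyGetD labels j 0 == lab) := by
  have h := PySem.Dict.getD_foldl_modify_append
      ((PySem.List.pyRange 0 n 1).map (fun idx => (PySem.List.pyGetD labels idx 0, idx)))
      (PySem.Dict.empty (κ := Int) (ν := List Int)) lab
  simp only [List.foldl_map, List.filter_map, PySem.Dict.getD_empty, List.nil_append] at h
  rw [h]
  rw [List.map_map]
  exact List.map_id _ ▸ rfl

-- restricting a flatMap to a filter whose complement contributes nothing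
lemma flatMap_filter_of_none {α β : Type} (p : α → Bool) (f : α → List β)
    (l : List α) (h : ∀ x, p x = false → f x = []) :
    l.flatMap f = (l.filter p).flatMap f := by
  induction l with
  | nil => rfl
  | cons a l ih =>
    cases hp : p a with
    | true => simp [hp, ih]
    | false => simp [hp, ih, h a hp]

-- after building, diff.getD lab [] is, for every label lab occurring in groups, the
-- ascending list of indices carrying a different label
lemma diff_getD (labels : List Int) (n : Int) (g : PySem.Dict Int (List Int))
    (hnd : g.keys.Nodup) (lab : Int) (hmem : lab ∈ g.keys) :
    (g.keys.foldl
        (fun d l' => d.insert l' ((PySem.List.pyRange 0 n 1).filter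
          (fun k => PySem.List.pyGetD labels k 0 != l'))) PySem.Dict.empty).getD lab []
      = (PySem.List.pyRange 0 n 1).filter (fun k => PySem.List.pyGetD labels k 0 != lab) := by
  set f : Int → List Int :=
    fun l' => (PySem.List.pyRange 0 n 1).filter (fun k => PySem.List.pyGetD labels k 0 != l') with hf
  have hitems := PySem.Dict.items_foldl_insert_fresh g.keys (fun l' => l') f
      (PySem.Dict.empty (κ := Int) (ν := List Int))
      (by intro a _; simp [PySem.Dict.contains_empty]) (by simpa using hnd)
  set D := g.keys.foldl (fun d l' => d.insert l' (f l')) PySem.Dict.empty with hD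
  have hmem_items : (lab, f lab) ∈ D.items := by
    rw [hitems]
    simp only [PySem.Dict.empty, List.nil_append, List.mem_map]
    exact ⟨lab, hmem, rfl⟩
  have hndD : D.keys.Nodup := by
    have : D.keys = g.keys := by
      simp only [PySem.Dict.keys, hitems, PySem.Dict.empty, List.nil_append,
        List.map_map]
      simp [Function.comp]
    rw [this]; exact hnd
  exact PySem.Dict.getD_of_mem_items D hmem_items hndD []

theorem create_triplets_spec : Claim_equal_create_triplets := by
  intro ds ls _ _
  unfold Spec_create_triplets create_triplets create_triplets_alt
  -- name the pieces of B
  set n : Int := (ds.length : Int) with hn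
  set groups : PySem.Dict Int (List Int) :=
    (PySem.List.pyRange 0 n 1).foldl
      (fun d idx => d.modify (PySem.List.pyGetD ls idx 0) [] (· ++ [idx])) PySem.Dict.empty
    with hgroups
  have hndg : groups.keys.Nodup := by
    rw [hgroups]
    exact PySem.Dict.nodup_keys_foldl_modify_key _ _ _ _ _ (by simp)
  have hkeysg : groups.keys = PySem.Set.update (PySem.Dict.empty (κ := Int) (ν := List Int)).keys
      ((PySem.List.pyRange 0 n 1).map (fun idx => PySem.List.pyGetD ls idx 0)) := by
    rw [hgroups]
    exact PySem.Dict.keys_foldl_modify_key _ _ _ _ _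
  -- A as a nested flatMap over index ranges
  rw [PySem.List.enumerate_eq_map_pyRange (d := 0)]
  simp only [List.foldl_map]
  simp only [PySem.List.foldl_append_if, PySem.List.foldl_append_eq_flatMap, List.nil_append]
  -- B: inner k-loop is a map, j-loop is a flatMap over a filter, outer loop is a flatMap
  simp only [foldl_append_block_if, PySem.List.foldl_append_eq_flatMap, List.nil_append]
  simp only [← List.map_eq_flatMap]
  apply List.flatMap_congr
  intro i hi
  -- the label of anchor i is a key of groups
  have hik : PySem.List.pyGetD ls i 0 ∈ groups.keys := by
    rw [hkeysg]
    have : PySem.List.pyGetD ls i 0 ∈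
        (PySem.List.pyRange 0 n 1).map (fun idx => PySem.List.pyGetD ls idx 0) :=
      List.mem_map.mpr ⟨i, hi, rfl⟩
    simp [PySem.Set.mem_update, PySem.Dict.keys_empty, this]
  rw [show groups.getD (PySem.List.pyGetD ls i 0) [] =
      (PySem.List.pyRange 0 n 1).filter
        (fun j => PySem.List.pyGetD ls j 0 == PySem.List.pyGetD ls i 0) from
    hgroups ▸ groups_getD ls n _]
  rw [diff_getD ls n groups hndg _ hik]
  rw [List.filter_filter]
  -- A's per-anchor term: drop the j's whose inner list is empty, then align the filters
  rw [flatMap_filter_of_none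
      (p := fun j => (j != i) && (PySem.List.pyGetD ls j 0 == PySem.List.pyGetD ls i 0))]
  · apply List.flatMap_congr
    intro j hj
    have hj' := (List.mem_filter.mp hj).2
    simp only [Bool.and_eq_true, bne_iff_ne, beq_iff_eq, ne_eq] at hj'
    obtain ⟨hji, hlab⟩ := hj'
    congr 1
    apply List.filter_congr
    intro k _
    rw [hlab, Bool.eq_iff_iff]
    simp only [Bool.and_eq_true, bne_iff_ne, ne_eq, beq_iff_eq]
    constructor
    · intro h
      exact fun e => h.1.2 e.symm
    · intro h
      exact ⟨⟨trivial, fun e => h e.symm⟩, Ne.symm hji⟩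
  · intro j hjf
    simp only [Bool.and_eq_false_iff, bne_eq_false_iff_eq, beq_eq_false_iff_ne, ne_eq] at hjf
    rw [List.map_eq_nil_iff, List.filter_eq_nil_iff]
    intro k _ hc
    simp only [Bool.and_eq_true, bne_iff_ne, beq_iff_eq, ne_eq] at hc
    obtain ⟨⟨he, -⟩, hij⟩ := hc
    rcases hjf with h | h
    · exact hij h.symm
    · exact h he.symm
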